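-- pv_equiv track=rewrite | github.com/chcl77/OpenSource_Assignment | 3week_Grade_Management_with_function.py | Show_Rank
-- ===== SOURCE A (Python) =====
-- def Show_Rank(arr) :
--
--     index_grade = []
--     sum = 0
--     for i in range(0, 5) :
--         sum = 0
--         for j in range(2, 5) :
--             sum += arr[i][j]
--         index_grade.append(sum)
--     list = sorted(index_grade, reverse = True)
--     result = []
--     for i in index_grade :
--         result.append(list.index(i) + 1)
--     return result
-- ===== SOURCE B (Python) =====
-- def Show_Rank(arr):
--     rows = [arr[i] for i in range(5)]
--     sums = [r[2] + r[3] + r[4] for r in rows]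
--     return [1 + sum(1 for t in sums if t > s) for s in sums]
-- ===== Notes on version B (the rewrite author's own statement) =====
-- stated objective: simpler
-- what changed: B replaces the nested accumulator loops by two comprehensions (an explicit three-term sum per row) and replaces the sort-then-list.index rank lookup by a direct count of strictly greater sums (rank = 1 + #strictly greater), which agrees on ties.
import Mathlib
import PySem

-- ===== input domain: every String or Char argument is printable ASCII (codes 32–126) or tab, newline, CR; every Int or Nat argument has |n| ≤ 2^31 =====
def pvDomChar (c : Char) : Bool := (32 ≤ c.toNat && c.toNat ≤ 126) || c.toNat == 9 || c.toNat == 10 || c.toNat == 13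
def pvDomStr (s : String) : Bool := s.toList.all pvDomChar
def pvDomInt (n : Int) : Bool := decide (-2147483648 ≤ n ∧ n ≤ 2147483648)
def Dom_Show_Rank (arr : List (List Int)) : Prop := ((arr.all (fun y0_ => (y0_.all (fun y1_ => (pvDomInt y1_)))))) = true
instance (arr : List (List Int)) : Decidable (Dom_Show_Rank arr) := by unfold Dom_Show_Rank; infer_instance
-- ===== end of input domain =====

-- B replaces the nested accumulator loops by comprehensions (rows, then explicit three-term
-- sums) and the sort + list.index rank lookup by a 0/1-sum counting strictly greater sums.

-- ===== PORT A =====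
def Show_Rank (arr : List (List Int)) : List Int :=
  let index_grade := (PySem.List.pyRange 0 5 1).foldl (fun acc i =>
      acc ++ [(PySem.List.pyRange 2 5 1).foldl
        (fun s j => s + PySem.List.pyGetD (PySem.List.pyGetD arr i []) j 0) 0]) []
  let lst := PySem.List.sorted index_grade (fun t => t) true
  index_grade.foldl (fun res i => res ++ [((PySem.List.index? lst i).getD 0 : Int) + 1]) []

-- ===== PORT B =====
def Show_Rank_alt (arr : List (List Int)) : List Int :=
  let rows := (PySem.List.pyRange 0 5 1).map (fun i => PySem.List.pyGetD arr i [])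
  let sums := rows.map (fun r =>
      PySem.List.pyGetD r 2 0 + PySem.List.pyGetD r 3 0 + PySem.List.pyGetD r 4 0)
  sums.map (fun s => 1 + (sums.map (fun t => if s < t then (1 : Int) else 0)).sum)

-- ===== PRECONDITION & SPEC =====
-- A indexes arr[0..4][2..4] directly: it raises IndexError unless there are at least
-- 5 rows and each of the first 5 rows has at least 5 entries.
def Pre_Show_Rank (arr : List (List Int)) : Prop :=
  5 ≤ arr.length ∧ ∀ row ∈ arr.take 5, 5 ≤ row.length
instance (arr : List (List Int)) : Decidable (Pre_Show_Rank arr) := by unfold Pre_Show_Rank; infer_instance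
def pvWitness_Show_Rank : List (List Int) :=
  [[0,0,1,2,3],[0,0,1,2,3],[0,0,9,9,9],[0,0,0,0,0],[0,0,1,2,3]]

def Spec_Show_Rank (arr : List (List Int)) (out : List Int) : Prop := out = Show_Rank_alt arr
instance (arr : List (List Int)) (out : List Int) : Decidable (Spec_Show_Rank arr out) := by unfold Spec_Show_Rank; infer_instance

-- ===== CLAIM (what is proved, stated in full; the proofs are below) =====
def Claim_equal_Show_Rank : Prop := ∀ (arr : List (List Int)), Dom_Show_Rank arr → Pre_Show_Rank arr → Spec_Show_Rank arr (Show_Rank arr)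

-- ===== LEMMAS AND PROOFS =====

-- rank via sort+index = rank via counting strictly greater elements
lemma index_sorted_rev (l : List Int) (x : Int) (hx : x ∈ l) :
    PySem.List.index? (PySem.List.sorted l (fun t => t) true) x
      = some (l.countP (fun t => decide (x < t))) := by
  set s := PySem.List.sorted l (fun t => t) true with hs
  have hperm : s.Perm l := PySem.List.sorted_perm ..
  have hxs : x ∈ s := by rw [hs, PySem.List.mem_sorted]; exact hx
  have hpw : s.Pairwise (fun a b => (fun t => t) b ≤ (fun t => t) a) :=
    PySem.List.sorted_pairwise_rev ..
  obtain ⟨k, hk⟩ := Option.isSome_iff_exists.mp ((PySem.List.index?_isSome_iff s x).mpr hxs)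
  obtain ⟨hklen, hsk, hbef⟩ := PySem.List.getElem_of_index?_eq_some hk
  rw [hk]
  congr 1
  symm
  have hpwg := List.pairwise_iff_getElem.mp hpw
  have h1 : (s.take k).countP (fun t => decide (x < t)) = k := by
    have hall : ∀ a ∈ s.take k, (fun t => decide (x < t)) a = true := by
      intro a ha
      obtain ⟨j, hj, hja⟩ := List.mem_iff_getElem.mp ha
      have hjk : j < k := by simp [List.length_take] at hj; omega
      have hjl : j < s.length := by omega
      have hgj : (s.take k)[j] = s[j] := List.getElem_take
      have hle : x ≤ s[j] := by
        have := hpwg j k hjl hklen hjk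
        simpa [hsk] using this
      have hne : s[j] ≠ x := hbef j hjk
      simp only [decide_eq_true_eq]
      rw [← hja, hgj]
      exact lt_of_le_of_ne hle (fun h => hne h.symm)
    rw [List.countP_eq_length.mpr hall, List.length_take]
    omega
  have h2 : (s.drop k).countP (fun t => decide (x < t)) = 0 := by
    rw [List.countP_eq_zero]
    intro a ha
    obtain ⟨j, hj, hja⟩ := List.mem_iff_getElem.mp ha
    have hjl : k + j < s.length := by simp [List.length_drop] at hj; omega
    have hga : a = s[k + j] := by rw [← hja, List.getElem_drop]
    rcases Nat.eq_zero_or_pos j with h0 | hpos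
    · subst h0
      simp only [decide_eq_true_eq]
      rw [hga]
      simp [hsk]
    · have hlt : s[k + j] ≤ x := by
        have := hpwg k (k + j) hklen hjl (by omega)
        simpa [hsk] using this
      simp only [decide_eq_true_eq]
      rw [hga]
      omega
  have hcnt : l.countP (fun t => decide (x < t)) = s.countP (fun t => decide (x < t)) :=
    (hperm.countP_eq _).symm
  rw [hcnt]
  conv_lhs => rw [← List.take_append_drop k s]
  rw [List.countP_append, h1, h2]
  omega

lemma sum_ones_count (x : Int) (L : List Int) :
    (L.map (fun t => if x < t then (1 : Int) else 0)).sum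
      = (L.countP (fun t => decide (x < t)) : Nat) := by
  induction L with
  | nil => simp
  | cons h t ih =>
    by_cases hxt : x < h
    · simp [hxt, ih]; omega
    · simp [hxt, ih]

-- A's inner summation loop over j in range(2,5) is the explicit three-term sum
lemma row_sum (r : List Int) :
    (PySem.List.pyRange 2 5 1).foldl (fun s j => s + PySem.List.pyGetD r j 0) 0
      = PySem.List.pyGetD r 2 0 + PySem.List.pyGetD r 3 0 + PySem.List.pyGetD r 4 0 := by
  rw [show PySem.List.pyRange 2 5 1 = [2, 3, 4] from by decide]
  simp only [List.foldl_cons, List.foldl_nil, zero_add]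

-- A's append-fold building index_grade equals B's map building sums
lemma sums_eq (arr : List (List Int)) :
    (PySem.List.pyRange 0 5 1).foldl (fun acc i =>
        acc ++ [(PySem.List.pyRange 2 5 1).foldl
          (fun s j => s + PySem.List.pyGetD (PySem.List.pyGetD arr i []) j 0) 0]) []
      = ((PySem.List.pyRange 0 5 1).map (fun i => PySem.List.pyGetD arr i [])).map (fun r =>
          PySem.List.pyGetD r 2 0 + PySem.List.pyGetD r 3 0 + PySem.List.pyGetD r 4 0) := by
  rw [PySem.List.foldl_append_singleton_eq_map, List.map_map]
  simp only [List.nil_append]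
  exact List.map_congr_left (fun i _ => row_sum _)

-- ===== VERDICT (by name: the statement is the Claim_ definition above) =====
theorem Show_Rank_spec : Claim_equal_Show_Rank := by
  unfold Claim_equal_Show_Rank
  intro arr _ _
  unfold Spec_Show_Rank Show_Rank Show_Rank_alt
  rw [sums_eq arr]
  set L := ((PySem.List.pyRange 0 5 1).map (fun i => PySem.List.pyGetD arr i [])).map (fun r =>
      PySem.List.pyGetD r 2 0 + PySem.List.pyGetD r 3 0 + PySem.List.pyGetD r 4 0) with hL
  rw [PySem.List.foldl_append_singleton_eq_map]
  simp only [List.nil_append]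
  apply List.map_congr_left
  intro x hx
  rw [index_sorted_rev _ x hx, sum_ones_count, ← hL]
  simp only [Option.getD_some]
  omega
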